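-- pv_equiv track=rewrite | github.com/dandypst/T-Neo.V0 | teneo_bot.py | _pick_agent
-- ===== SOURCE A (Python) =====
-- def _pick_agent(agents):
--     """Pilih agent online termurah."""
--     online_ids = {a.get("id") for a in agents if a.get("status") == "online"}
--     for preferred in KNOWN_AGENTS:
--         if preferred in online_ids:
--             return preferred
--     # Fallback: agent pertama yang online
--     for a in agents:
--         if a.get("status") == "online":
--             return a.get("id", "crypto-tracker-ai-v2")
--     return "crypto-tracker-ai-v2"
--
-- KNOWN_AGENTS = [
--     "crypto-tracker-ai-v2",    # Crypto Tracker — murah, recommended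
--     "trading-knowledge-agent",  # Trading Agent
--     "gas-sniper-agent",         # Gas War Sniper
--     "amazon",                   # Amazon
--     "x-agent-enterprise-v2",   # X Platform Agent (lebih mahal)
-- ]
-- ===== SOURCE B (Python) =====
-- KNOWN_AGENTS = [
--     "crypto-tracker-ai-v2",
--     "trading-knowledge-agent",
--     "gas-sniper-agent",
--     "amazon",
--     "x-agent-enterprise-v2",
-- ]
--
--
-- def _pick_agent(agents):
--     """Pilih agent online termurah (single pass, no set)."""
--     n = len(KNOWN_AGENTS)
--     best = n
--     first = None
--     for a in agents:
--         if a.get("status") == "online":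
--             if first is None:
--                 first = a.get("id", "crypto-tracker-ai-v2")
--             aid = a.get("id")
--             if aid in KNOWN_AGENTS:
--                 r = KNOWN_AGENTS.index(aid)
--                 if r < best:
--                     best = r
--     if best < n:
--         return KNOWN_AGENTS[best]
--     return first if first is not None else "crypto-tracker-ai-v2"
-- ===== Notes on version B (the rewrite author's own statement) =====
-- stated objective: simpler
-- what changed: Replaces the set comprehension plus two sequential scans (preference-list probe, then fallback rescan) by one pass over the agents that tracks the minimal preference rank and the first online agent's id.
import Mathlib
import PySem

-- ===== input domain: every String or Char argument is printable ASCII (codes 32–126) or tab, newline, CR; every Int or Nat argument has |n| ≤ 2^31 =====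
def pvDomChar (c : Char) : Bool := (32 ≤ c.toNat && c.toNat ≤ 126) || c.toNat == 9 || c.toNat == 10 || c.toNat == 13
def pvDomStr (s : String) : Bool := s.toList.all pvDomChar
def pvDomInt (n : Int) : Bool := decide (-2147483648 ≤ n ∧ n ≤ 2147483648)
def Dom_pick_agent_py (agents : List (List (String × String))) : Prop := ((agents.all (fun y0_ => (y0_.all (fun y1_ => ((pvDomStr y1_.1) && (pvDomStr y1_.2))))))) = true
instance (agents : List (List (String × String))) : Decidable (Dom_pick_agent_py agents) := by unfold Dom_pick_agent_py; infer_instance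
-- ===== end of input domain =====

-- B replaces A's set comprehension plus two sequential scans by a single pass tracking the
-- minimal preference rank and the first online agent (objective: simpler).


-- ===== PORT A =====
def knownAgents : List String :=
  ["crypto-tracker-ai-v2", "trading-knowledge-agent", "gas-sniper-agent", "amazon",
   "x-agent-enterprise-v2"]

def pick_agent_py (agents : List (List (String × String))) : String :=
  let online_ids : PySem.Set (Option String) :=
    PySem.Set.ofList
      ((agents.filter (fun a => PySem.Dict.get? ⟨a⟩ "status" == some "online")).map
        (fun a => PySem.Dict.get? ⟨a⟩ "id"))
  match knownAgents.find? (fun preferred => PySem.Set.contains online_ids (some preferred)) with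
  | some preferred => preferred
  | none =>
    match agents.find? (fun a => PySem.Dict.get? ⟨a⟩ "status" == some "online") with
    | some a => PySem.Dict.getD ⟨a⟩ "id" "crypto-tracker-ai-v2"
    | none => "crypto-tracker-ai-v2"

-- ===== PORT B =====
def pickStep (s : Nat × Option String) (a : List (String × String)) : Nat × Option String :=
  if PySem.Dict.get? ⟨a⟩ "status" == some "online" then
    let first : Option String :=
      match s.2 with
      | none => some (PySem.Dict.getD ⟨a⟩ "id" "crypto-tracker-ai-v2")
      | some f => some f
    let best : Nat :=
      match PySem.Dict.get? ⟨a⟩ "id" with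
      | some aid =>
        match PySem.List.index? knownAgents aid with
        | some r => if r < s.1 then r else s.1
        | none => s.1
      | none => s.1
    (best, first)
  else s

def pick_agent_py_alt (agents : List (List (String × String))) : String :=
  let s := agents.foldl pickStep (knownAgents.length, none)
  if s.1 < knownAgents.length then knownAgents.getD s.1 "crypto-tracker-ai-v2"
  else
    match s.2 with
    | some f => f
    | none => "crypto-tracker-ai-v2"


-- ===== PRECONDITION & SPEC =====
def Spec_pick_agent_py (agents : List (List (String × String))) (out : String) : Prop := out = pick_agent_py_alt agents
instance (agents : List (List (String × String))) (out : String) : Decidable (Spec_pick_agent_py agents out) := by unfold Spec_pick_agent_py; infer_instance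

-- ===== CLAIM (what is proved, stated in full; the proofs are below) =====
def Claim_equal_pick_agent_py : Prop := ∀ (agents : List (List (String × String))), Dom_pick_agent_py agents → Spec_pick_agent_py agents (pick_agent_py agents)

-- ===== LEMMAS AND PROOFS =====
-- proof-side defs
def onl (a : List (String × String)) : Bool :=
  PySem.Dict.get? ⟨a⟩ "status" == some "online"

def aid? (a : List (String × String)) : Option String :=
  PySem.Dict.get? ⟨a⟩ "id"

def ids (agents : List (List (String × String))) : List (Option String) :=
  (agents.filter onl).map aid?

def ranks (agents : List (List (String × String))) : List Nat :=
  (ids agents).filterMap (fun oid => oid.bind (fun v => PySem.List.index? knownAgents v))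

def mn (l : List Nat) (b : Nat) : Nat := l.foldl (fun b r => if r < b then r else b) b

def gB (b : Nat) (a : List (String × String)) : Nat :=
  if onl a then
    match aid? a with
    | some aid =>
      match PySem.List.index? knownAgents aid with
      | some r => if r < b then r else b
      | none => b
    | none => b
  else b

def hF (f : Option String) (a : List (String × String)) : Option String :=
  if onl a then
    match f with
    | none => some (PySem.Dict.getD ⟨a⟩ "id" "crypto-tracker-ai-v2")
    | some x => some x
  else f

lemma pickStep_eq (s : Nat × Option String) (a : List (String × String)) :
    pickStep s a = (gB s.1 a, hF s.2 a) := by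
  unfold pickStep gB hF onl aid?
  split <;> rename_i hc <;> simp

lemma foldl_pickStep (agents : List (List (String × String))) (b : Nat) (f : Option String) :
    agents.foldl pickStep (b, f) = (agents.foldl gB b, agents.foldl hF f) := by
  have : agents.foldl pickStep (b, f)
      = agents.foldl (fun s e => (gB s.1 e, hF s.2 e)) (b, f) := by
    apply PySem.List.foldl_congr_mem
    intro s e _; exact pickStep_eq s e
  rw [this, PySem.List.foldl_prod_mk]

lemma foldl_gB (agents : List (List (String × String))) (b : Nat) :
    agents.foldl gB b = mn (ranks agents) b := by
  induction agents generalizing b with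
  | nil => rfl
  | cons a t ih =>
    by_cases hc : onl a
    · simp only [List.foldl_cons, gB, hc, if_true]
      cases ha : aid? a with
      | none => simp [ih, ranks, ids, hc, ha]
      | some v =>
        cases hi : PySem.List.index? knownAgents v with
        | none =>
          rw [PySem.List.index?_eq_idxOf?] at hi
          simp [ih, ranks, ids, hc, ha, hi]
        | some r =>
          rw [PySem.List.index?_eq_idxOf?] at hi
          simp [ih, ranks, ids, hc, ha, hi, mn]
    · simp [List.foldl_cons, gB, hc, ih, ranks, ids]

lemma foldl_hF_some (agents : List (List (String × String))) (x : String) :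
    agents.foldl hF (some x) = some x := by
  induction agents with
  | nil => rfl
  | cons a t ih => simp only [List.foldl_cons, hF]; split <;> simp [ih]

lemma foldl_hF_none (agents : List (List (String × String))) :
    agents.foldl hF none
      = (agents.find? onl).map (fun a => PySem.Dict.getD ⟨a⟩ "id" "crypto-tracker-ai-v2") := by
  induction agents with
  | nil => rfl
  | cons a t ih =>
    by_cases hc : onl a
    · simp [List.foldl_cons, hF, hc, foldl_hF_some]
    · simp [List.foldl_cons, hF, hc, ih]

lemma mn_le (l : List Nat) (b : Nat) : mn l b ≤ b ∧ ∀ r ∈ l, mn l b ≤ r := by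
  induction l generalizing b with
  | nil => simp [mn]
  | cons r t ih =>
    have h := ih (if r < b then r else b)
    constructor
    · exact le_trans h.1 (by split <;> omega)
    · intro x hx
      rcases List.mem_cons.1 hx with rfl | hx
      · exact le_trans h.1 (by split <;> omega)
      · exact h.2 x hx

lemma mn_mem (l : List Nat) (b : Nat) : mn l b = b ∨ mn l b ∈ l := by
  induction l generalizing b with
  | nil => simp [mn]
  | cons r t ih =>
    rcases ih (if r < b then r else b) with h | h
    · rw [mn, List.foldl_cons, ← mn] at *
      rw [h]; split
      · right; simp
      · left; rfl
    · right; rw [mn, List.foldl_cons, ← mn]; exact List.mem_cons_of_mem _ h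

lemma mem_ranks_elim {r : Nat} {agents : List (List (String × String))}
    (h : r ∈ ranks agents) :
    r < 5 ∧ some (knownAgents.getD r "") ∈ ids agents := by
  rw [ranks, List.mem_filterMap] at h
  obtain ⟨oid, hmem, heq⟩ := h
  cases oid with
  | none => simp at heq
  | some v =>
    simp only [Option.bind_some] at heq
    obtain ⟨hk, hget, _⟩ := PySem.List.getElem_of_index?_eq_some heq
    refine ⟨by simpa [knownAgents] using hk, ?_⟩
    have : knownAgents.getD r "" = v := by
      rw [List.getD_eq_getElem _ _ hk, hget]
    rwa [this]

lemma mem_ranks_intro {i : Nat} {agents : List (List (String × String))}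
    (hi : i < 5) (h : some (knownAgents.getD i "") ∈ ids agents) :
    i ∈ ranks agents := by
  rw [ranks, List.mem_filterMap]
  refine ⟨some (knownAgents.getD i ""), h, ?_⟩
  simp only [Option.bind_some]
  interval_cases i <;> decide

lemma contains_ofList (L : List (Option String)) (x : Option String) :
    PySem.Set.contains (PySem.Set.ofList L) x = decide (x ∈ L) := by
  simp [PySem.Set.contains_eq_listContains, PySem.Set.mem_ofList]

lemma A_eq (agents : List (List (String × String))) :
    pick_agent_py agents =
      match knownAgents.find? (fun p => decide (some p ∈ ids agents)) with
      | some p => p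
      | none =>
        match agents.find? onl with
        | some a => PySem.Dict.getD ⟨a⟩ "id" "crypto-tracker-ai-v2"
        | none => "crypto-tracker-ai-v2" := by
  unfold pick_agent_py
  simp only [contains_ofList]
  rfl

lemma B_eq (agents : List (List (String × String))) :
    pick_agent_py_alt agents =
      if mn (ranks agents) 5 < 5 then knownAgents.getD (mn (ranks agents) 5) "crypto-tracker-ai-v2"
      else
        match (agents.find? onl).map (fun a => PySem.Dict.getD ⟨a⟩ "id" "crypto-tracker-ai-v2") with
        | some f => f
        | none => "crypto-tracker-ai-v2" := by
  unfold pick_agent_py_alt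
  rw [show ((knownAgents.length, (none : Option String)) : Nat × Option String) = (5, none) from rfl,
    foldl_pickStep, foldl_gB, foldl_hF_none]
  rfl

theorem equal_main (agents : List (List (String × String))) :
    pick_agent_py agents = pick_agent_py_alt agents := by
  rw [A_eq, B_eq]
  by_cases h5 : mn (ranks agents) 5 < 5
  · have hmem : mn (ranks agents) 5 ∈ ranks agents := by
      rcases mn_mem (ranks agents) 5 with h | h
      · omega
      · exact h
    have h1 := (mem_ranks_elim hmem).2
    have h2 : ∀ i, i < mn (ranks agents) 5 → some (knownAgents.getD i "") ∉ ids agents := by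
      intro i hi hin
      have hr := mem_ranks_intro (lt_trans hi h5) hin
      have := (mn_le (ranks agents) 5).2 i hr
      omega
    interval_cases hm : (mn (ranks agents) 5)
    · have m0 : some "crypto-tracker-ai-v2" ∈ ids agents := by simpa [knownAgents] using h1
      simp [knownAgents, m0]
    · have e0 : some "crypto-tracker-ai-v2" ∉ ids agents := by
        simpa [knownAgents] using h2 0 (by omega)
      have m1 : some "trading-knowledge-agent" ∈ ids agents := by simpa [knownAgents] using h1
      simp [knownAgents, List.find?, e0, m1]
    · have e0 : some "crypto-tracker-ai-v2" ∉ ids agents := by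
        simpa [knownAgents] using h2 0 (by omega)
      have e1 : some "trading-knowledge-agent" ∉ ids agents := by
        simpa [knownAgents] using h2 1 (by omega)
      have m2 : some "gas-sniper-agent" ∈ ids agents := by simpa [knownAgents] using h1
      simp [knownAgents, List.find?, e0, e1, m2]
    · have e0 : some "crypto-tracker-ai-v2" ∉ ids agents := by
        simpa [knownAgents] using h2 0 (by omega)
      have e1 : some "trading-knowledge-agent" ∉ ids agents := by
        simpa [knownAgents] using h2 1 (by omega)
      have e2 : some "gas-sniper-agent" ∉ ids agents := by
        simpa [knownAgents] using h2 2 (by omega)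
      have m3 : some "amazon" ∈ ids agents := by simpa [knownAgents] using h1
      simp [knownAgents, List.find?, e0, e1, e2, m3]
    · have e0 : some "crypto-tracker-ai-v2" ∉ ids agents := by
        simpa [knownAgents] using h2 0 (by omega)
      have e1 : some "trading-knowledge-agent" ∉ ids agents := by
        simpa [knownAgents] using h2 1 (by omega)
      have e2 : some "gas-sniper-agent" ∉ ids agents := by
        simpa [knownAgents] using h2 2 (by omega)
      have e3 : some "amazon" ∉ ids agents := by
        simpa [knownAgents] using h2 3 (by omega)
      have m4 : some "x-agent-enterprise-v2" ∈ ids agents := by simpa [knownAgents] using h1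
      simp [knownAgents, List.find?, e0, e1, e2, e3, m4]
  · have h2 : ∀ i, i < 5 → some (knownAgents.getD i "") ∉ ids agents := by
      intro i hi hin
      have hr := mem_ranks_intro hi hin
      have := (mn_le (ranks agents) 5).2 i hr
      omega
    have e0 : some "crypto-tracker-ai-v2" ∉ ids agents := by
      simpa [knownAgents] using h2 0 (by omega)
    have e1 : some "trading-knowledge-agent" ∉ ids agents := by
      simpa [knownAgents] using h2 1 (by omega)
    have e2 : some "gas-sniper-agent" ∉ ids agents := by
      simpa [knownAgents] using h2 2 (by omega)
    have e3 : some "amazon" ∉ ids agents := by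
      simpa [knownAgents] using h2 3 (by omega)
    have e4 : some "x-agent-enterprise-v2" ∉ ids agents := by
      simpa [knownAgents] using h2 4 (by omega)
    rw [if_neg h5]
    simp only [knownAgents, List.find?]
    simp only [e0, e1, e2, e3, e4]
    cases agents.find? onl <;> simp


-- ===== VERDICT (by name: the statement is the Claim_ definition above) =====
theorem pick_agent_py_spec : Claim_equal_pick_agent_py := by
  intro agents _
  exact equal_main agents
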